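-- pv_equiv track=rewrite | github.com/kubakoltun/PythonDailyExercices | cat_moves.py | solution
-- ===== SOURCE A (Python) =====
-- def solution(start, finish):
--     moves = 0
--     hasJumped = False
--
--     for i in range (start, finish):
--         hasJumped = False
--
--         if ((start + 3)%2 == 0 and start+3 <= finish):
--             start += 3
--             moves += 1
--             hasJumped = True
--         elif (((start+3)%2 != 0) and start+3 <=finish):
--             start += 3
--             moves += 1
--             hasJumped = True
--         elif (hasJumped == False):
--             start += 1
--             moves += 1
--             hasJumped = True
--         if (start == finish):
--             break
--
--
--     return moves
-- ===== SOURCE B (Python) =====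
-- def solution(start, finish):
--     # Closed form: each +3 jump covers 3 units, the remainder is walked in +1 steps.
--     d = finish - start
--     if d <= 0:
--         return 0
--     return d // 3 + d % 3
-- ===== Notes on version B (the rewrite author's own statement) =====
-- stated objective: faster
-- what changed: Replaced the step-by-step simulation loop with the closed form d//3 + d%3 on d = finish-start (0 if d <= 0).
import Mathlib
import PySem

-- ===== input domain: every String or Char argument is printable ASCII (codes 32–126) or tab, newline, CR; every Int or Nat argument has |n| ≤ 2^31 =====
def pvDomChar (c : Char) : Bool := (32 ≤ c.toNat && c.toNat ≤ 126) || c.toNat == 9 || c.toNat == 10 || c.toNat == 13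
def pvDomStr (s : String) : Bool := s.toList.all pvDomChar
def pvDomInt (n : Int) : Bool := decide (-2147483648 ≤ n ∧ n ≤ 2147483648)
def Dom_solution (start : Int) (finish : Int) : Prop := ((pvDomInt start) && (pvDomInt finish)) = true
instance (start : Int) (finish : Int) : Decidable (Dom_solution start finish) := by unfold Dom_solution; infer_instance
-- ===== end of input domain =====

-- B replaces A's step-by-step simulation loop with the O(1) closed form d // 3 + d % 3.

-- ===== PORT A =====
-- one iteration body of A's `for i in range(start, finish)` with `break`;
-- state carried: (moves, start, hasJumped); hasJumped is reset to false at the top of each iteration.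
def solutionGo (finish : Int) : List Int → Int → Int → Bool → Int
  | [], moves, _s, _hj => moves
  | _ :: rest, moves, s, _hj =>
    -- hasJumped is set to False at the top of each iteration, so the last elif tests false == False;
    -- after the chain, `if start == finish: break` is the trailing check in each branch
    if PySem.Int.mod (s + 3) 2 = 0 ∧ s + 3 ≤ finish then
      if s + 3 = finish then moves + 1 else solutionGo finish rest (moves + 1) (s + 3) true
    else if PySem.Int.mod (s + 3) 2 ≠ 0 ∧ s + 3 ≤ finish then
      if s + 3 = finish then moves + 1 else solutionGo finish rest (moves + 1) (s + 3) true
    else if (false : Bool) = false then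
      if s + 1 = finish then moves + 1 else solutionGo finish rest (moves + 1) (s + 1) true
    else
      if s = finish then moves else solutionGo finish rest moves s false

def solution (start : Int) (finish : Int) : Int :=
  solutionGo finish (PySem.List.pyRange start finish 1) 0 start false

-- ===== PORT B =====
def solution_alt (start : Int) (finish : Int) : Int :=
  let d := finish - start
  if d ≤ 0 then 0 else PySem.Int.floordiv d 3 + PySem.Int.mod d 3

-- ===== PRECONDITION & SPEC =====
def Spec_solution (start : Int) (finish : Int) (out : Int) : Prop := out = solution_alt start finish
instance (start : Int) (finish : Int) (out : Int) : Decidable (Spec_solution start finish out) := by unfold Spec_solution; infer_instance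

-- ===== CLAIM (what is proved, stated in full; the proofs are below) =====
def Claim_equal_solution : Prop := ∀ (start : Int) (finish : Int), Dom_solution start finish → Spec_solution start finish (solution start finish)

-- ===== LEMMAS AND PROOFS =====

-- loop invariant: with enough iterations left, the loop adds exactly (d/3 + d%3) moves for d = finish - s > 0
theorem solutionGo_closed (finish : Int) (l : List Int) : ∀ (moves s : Int) (hj : Bool),
    s < finish → (finish - s).toNat ≤ l.length →
    solutionGo finish l moves s hj = moves + ((finish - s) / 3 + (finish - s) % 3) := by
  induction l with
  | nil =>
    intro moves s hj hlt hlen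
    simp only [List.length_nil, Nat.le_zero] at hlen
    omega
  | cons a rest ih =>
    intro moves s hj hlt hlen
    simp only [List.length_cons] at hlen
    rw [solutionGo]
    by_cases hjump : s + 3 ≤ finish
    · by_cases hm : PySem.Int.mod (s + 3) 2 = 0 <;>
        simp only [hm, hjump, and_true, ne_eq, not_true_eq_false, not_false_eq_true,
          if_true, if_false, ite_true, ite_false, true_and, false_and, and_self] <;>
      · by_cases hbreak : s + 3 = finish
        · rw [if_pos hbreak]; omega
        · rw [if_neg hbreak, ih (moves + 1) (s + 3) true (by omega) (by omega)]; omega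
    · have hm3 : ¬ (PySem.Int.mod (s + 3) 2 = 0 ∧ s + 3 ≤ finish) := fun h => hjump h.2
      have hm3' : ¬ (PySem.Int.mod (s + 3) 2 ≠ 0 ∧ s + 3 ≤ finish) := fun h => hjump h.2
      rw [if_neg hm3, if_neg hm3', if_pos rfl]
      by_cases hbreak : s + 1 = finish
      · rw [if_pos hbreak]; omega
      · rw [if_neg hbreak, ih (moves + 1) (s + 1) true (by omega) (by omega)]; omega

-- ===== VERDICT (by name: the statement is the Claim_ definition above) =====
theorem solution_spec : Claim_equal_solution := by
  intro start finish _
  unfold Spec_solution solution solution_alt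
  by_cases h : finish - start ≤ 0
  · rw [PySem.List.pyRange_one_eq_nil (by omega)]
    simp [solutionGo, h]
  · rw [solutionGo_closed finish _ 0 start false (by omega)
      (by rw [PySem.List.length_pyRange_one])]
    simp only [if_neg h]
    rw [PySem.Int.floordiv_eq_ediv_of_pos (by omega), PySem.Int.mod_eq_emod_of_pos (by omega)]
    omega
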